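-- pv_equiv track=rewrite | github.com/DBGilles/NemesisRetroWrite | retrowrite/rwtools/nemesis/LatencyMapper.py | all_present
-- ===== SOURCE A (Python) =====
-- import copy
--
-- def all_present(target_ops, candidate_ops):
--     """
--     Return true if all of the ops in target_ops are found in candidate_ops, otherwise return False
--     """
--     candidate_copy = list(copy.deepcopy(candidate_ops))
--
--     for target in target_ops:
--         matched = False
--         for candidate in candidate_copy:
--             if target == candidate:
--                 candidate_copy.remove(candidate)
--                 matched = True
--                 break
--         if not matched:
--             return False
--     return True
-- ===== SOURCE B (Python) =====
-- def all_present(target_ops, candidate_ops):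
--     """
--     Return true if all of the ops in target_ops are found in candidate_ops, otherwise return False
--     """
--     counts = {}
--     for c in candidate_ops:
--         counts[c] = counts.get(c, 0) + 1
--     for t in target_ops:
--         n = counts.get(t, 0)
--         if n == 0:
--             return False
--         counts[t] = n - 1
--     return True
-- ===== Notes on version B (the rewrite author's own statement) =====
-- stated objective: faster
-- what changed: Replaced the per-target linear scan-and-remove over a deep copy of candidate_ops with a hash frequency table built once and decremented per target (multiset-subset via counts).
import Mathlib
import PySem

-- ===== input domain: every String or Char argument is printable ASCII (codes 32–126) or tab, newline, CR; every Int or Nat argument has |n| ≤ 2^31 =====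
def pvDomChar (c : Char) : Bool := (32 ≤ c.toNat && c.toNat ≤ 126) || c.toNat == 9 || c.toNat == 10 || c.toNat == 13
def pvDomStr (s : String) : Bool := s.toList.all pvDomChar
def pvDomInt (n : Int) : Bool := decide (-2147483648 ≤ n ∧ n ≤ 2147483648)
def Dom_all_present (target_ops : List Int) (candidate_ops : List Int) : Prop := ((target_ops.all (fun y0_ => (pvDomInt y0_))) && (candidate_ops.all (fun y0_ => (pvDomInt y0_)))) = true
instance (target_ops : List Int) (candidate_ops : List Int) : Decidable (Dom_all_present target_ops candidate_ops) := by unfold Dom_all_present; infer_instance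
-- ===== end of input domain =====

-- B replaces A's per-target scan-and-remove over a copied list by a frequency table
-- built once and decremented per target (objective: faster, O(n+m) vs O(n*m)).

-- ===== PORT A =====
-- inner `for candidate in candidate_copy: if target == candidate: remove; break`
-- returns the list with the matched element removed, or none if no candidate matched
def apFindRemove (t : Int) : List Int → Option (List Int)
  | [] => none
  | c :: cs => if t = c then some cs else (apFindRemove t cs).map (c :: ·)

-- outer loop over target_ops, carrying candidate_copy; `return False` when unmatched
def apLoop : List Int → List Int → Bool
  | [], _ => true
  | t :: ts, cc =>
    match apFindRemove t cc with
    | some cc' => apLoop ts cc'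
    | none => false

def all_present (target_ops : List Int) (candidate_ops : List Int) : Bool :=
  apLoop target_ops candidate_ops

-- ===== PORT B =====
-- second loop of Source B: look up the count, fail on 0, else decrement
def altLoop : List Int → PySem.Dict Int Int → Bool
  | [], _ => true
  | t :: ts, counts =>
    let n := counts.getD t 0
    if n = 0 then false else altLoop ts (counts.insert t (n - 1))

def all_present_alt (target_ops : List Int) (candidate_ops : List Int) : Bool :=
  altLoop target_ops
    (candidate_ops.foldl (fun d c => d.insert c (d.getD c 0 + 1)) PySem.Dict.empty)

-- ===== PRECONDITION & SPEC =====
def Spec_all_present (target_ops : List Int) (candidate_ops : List Int) (out : Bool) : Prop := out = all_present_alt target_ops candidate_ops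
instance (target_ops : List Int) (candidate_ops : List Int) (out : Bool) : Decidable (Spec_all_present target_ops candidate_ops out) := by unfold Spec_all_present; infer_instance

-- ===== CLAIM (what is proved, stated in full; the proofs are below) =====
def Claim_equal_all_present : Prop := ∀ (target_ops : List Int) (candidate_ops : List Int), Dom_all_present target_ops candidate_ops → Spec_all_present target_ops candidate_ops (all_present target_ops candidate_ops)

-- ===== LEMMAS AND PROOFS =====

-- A's inner loop removes the first element equal to t (if any): it is List.erase
theorem apFindRemove_eq (t : Int) (cc : List Int) :
    apFindRemove t cc = if t ∈ cc then some (cc.erase t) else none := by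
  induction cc with
  | nil => simp [apFindRemove]
  | cons c cs ih =>
    by_cases h : t = c
    · subst h; simp [apFindRemove, List.erase_cons_head]
    · simp only [apFindRemove, if_neg h, ih, List.mem_cons]
      have hc : (c == t) = false := by simp; omega
      by_cases hm : t ∈ cs <;> simp [hm, h, hc]

-- loop invariant: the dict holds exactly the multiplicities of the remaining candidates
theorem apLoop_eq_altLoop (ts : List Int) :
    ∀ (cc : List Int) (d : PySem.Dict Int Int),
      (∀ x, d.getD x 0 = (cc.count x : Int)) → apLoop ts cc = altLoop ts d := by
  induction ts with
  | nil => intro cc d _; rfl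
  | cons t ts ih =>
    intro cc d hinv
    rw [apLoop, altLoop, apFindRemove_eq]
    by_cases hm : t ∈ cc
    · have hpos : 0 < cc.count t := List.count_pos_iff.mpr hm
      have hn : d.getD t 0 ≠ 0 := by rw [hinv]; omega
      simp only [if_pos hm, if_neg hn]
      apply ih
      intro x
      rw [PySem.Dict.getD_insert]
      by_cases hx : x = t
      · subst hx
        rw [if_pos rfl, hinv, List.count_erase_self]
        omega
      · rw [if_neg hx, hinv, List.count_erase_of_ne hx]
    · have h0 : d.getD t 0 = 0 := by
        rw [hinv, List.count_eq_zero_of_not_mem hm]; rfl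
      simp [hm, h0]

-- ===== VERDICT (by name: the statement is the Claim_ definition above) =====
theorem all_present_spec : Claim_equal_all_present := by
  intro target_ops candidate_ops _
  unfold Spec_all_present all_present all_present_alt
  apply apLoop_eq_altLoop
  intro x
  rw [PySem.Dict.getD_foldl_insert_add_one]
  simp
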